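-- pv_equiv track=rewrite | github.com/crushrrr007/software_Engineering_Project | src/monitors/network_monitor.py | _parse_whitelist
-- ===== SOURCE A (Python) =====
-- from typing import Dict, List, Set
--
-- def _parse_whitelist(whitelist: List[str]) -> Set[str]:
--     """
--     Parse whitelist (expand localhost variations)
--
--     Args:
--         whitelist: List of whitelisted IPs/patterns
--
--     Returns:
--         Set of whitelisted IPs
--     """
--     ips = set()
--     for entry in whitelist:
--         if entry in ["localhost", "127.0.0.1", "::1"]:
--             ips.add("127.0.0.1")
--             ips.add("::1")
--         else:
--             ips.add(entry)
--     return ips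
-- ===== SOURCE B (Python) =====
-- _LOCAL = ("localhost", "127.0.0.1", "::1")
--
-- def _parse_whitelist(whitelist):
--     n = len(whitelist)
--     if n == 0:
--         return set()
--     if n == 1:
--         e = whitelist[0]
--         return {"127.0.0.1", "::1"} if e in _LOCAL else {e}
--     mid = n // 2
--     return _parse_whitelist(whitelist[:mid]) | _parse_whitelist(whitelist[mid:])
-- ===== Notes on version B (the rewrite author's own statement) =====
-- stated objective: alternative
-- what changed: Replaces the single accumulator loop that branches and mutates one set with a divide-and-conquer recursion: split the list in half, build each half's IP set recursively (base cases n=0/n=1 do the localhost expansion), and merge the halves with set union.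
import Mathlib
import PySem

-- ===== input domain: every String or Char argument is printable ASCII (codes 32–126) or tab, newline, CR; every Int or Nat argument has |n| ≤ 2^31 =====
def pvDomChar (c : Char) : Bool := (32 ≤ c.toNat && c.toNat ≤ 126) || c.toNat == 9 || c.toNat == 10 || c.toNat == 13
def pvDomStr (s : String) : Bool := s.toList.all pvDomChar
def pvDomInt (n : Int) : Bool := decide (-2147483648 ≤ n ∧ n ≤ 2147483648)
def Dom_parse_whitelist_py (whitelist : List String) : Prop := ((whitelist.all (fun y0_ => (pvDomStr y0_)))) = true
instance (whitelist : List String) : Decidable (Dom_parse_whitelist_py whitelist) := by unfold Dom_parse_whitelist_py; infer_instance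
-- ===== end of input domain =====

-- B replaces A's single accumulator loop with a divide-and-conquer recursion (split in half, union the halves' sets); alternative decomposition, same result.


-- ===== PORT A =====
-- literal port of A: for-loop over the whitelist, branching per entry, mutating one set
def parse_whitelist_py (whitelist : List String) : List String :=
  whitelist.foldl (fun ips entry =>
    if entry ∈ ["localhost", "127.0.0.1", "::1"] then
      PySem.Set.add (PySem.Set.add ips "127.0.0.1") "::1"
    else
      PySem.Set.add ips entry) PySem.Set.empty

-- ===== PORT B =====
-- port of B: divide and conquer; xs[:mid] / xs[mid:] are take/drop (exact here: 0 ≤ mid ≤ len)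
def parse_whitelist_py_alt (whitelist : List String) : List String :=
  let n := whitelist.length
  if n = 0 then PySem.Set.empty
  else if n = 1 then
    let e := PySem.List.pyGetD whitelist 0 ""
    if e ∈ ["localhost", "127.0.0.1", "::1"] then
      PySem.Set.ofList ["127.0.0.1", "::1"]
    else
      PySem.Set.ofList [e]
  else
    let mid := n / 2
    PySem.Set.union (parse_whitelist_py_alt (whitelist.take mid))
                    (parse_whitelist_py_alt (whitelist.drop mid))
termination_by whitelist.length
decreasing_by
  · simp_all; omega
  · simp_all; omega

-- ===== PRECONDITION & SPEC =====
def Spec_parse_whitelist_py (whitelist : List String) (out : List String) : Prop := out = parse_whitelist_py_alt whitelist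
instance (whitelist : List String) (out : List String) : Decidable (Spec_parse_whitelist_py whitelist out) := by unfold Spec_parse_whitelist_py; infer_instance

-- ===== CLAIM (what is proved, stated in full; the proofs are below) =====
def Claim_equal_parse_whitelist_py : Prop := ∀ (whitelist : List String), Dom_parse_whitelist_py whitelist → Spec_parse_whitelist_py whitelist (parse_whitelist_py whitelist)

-- ===== LEMMAS AND PROOFS =====

def pvExpand (entry : String) : List String :=
  if entry ∈ ["localhost", "127.0.0.1", "::1"] then ["127.0.0.1", "::1"] else [entry]

-- A's branching fold is the add-fold over the flattened expansion, for any accumulator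
theorem pv_fold_flatMap (l : List String) (s : List String) :
    (l.flatMap pvExpand).foldl PySem.Set.add s =
    l.foldl (fun ips entry =>
      if entry ∈ ["localhost", "127.0.0.1", "::1"] then
        PySem.Set.add (PySem.Set.add ips "127.0.0.1") "::1"
      else
        PySem.Set.add ips entry) s := by
  induction l generalizing s with
  | nil => rfl
  | cons e t ih =>
    simp only [List.flatMap_cons, List.foldl_append, List.foldl_cons]
    rw [← ih]
    by_cases h : e ∈ ["localhost", "127.0.0.1", "::1"]
    · rw [if_pos h, pvExpand, if_pos h]; rfl
    · rw [if_neg h, pvExpand, if_neg h]; rfl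

theorem pv_mem_add {x : String} (s : PySem.Set String) (y : String) (h : x ∈ s) :
    x ∈ PySem.Set.add s y := by
  unfold PySem.Set.add; split <;> simp [h]

theorem pv_add_of_mem {x : String} (s : PySem.Set String) (h : x ∈ s) :
    PySem.Set.add s x = s := by
  unfold PySem.Set.add
  rw [if_pos (by simpa using h)]

theorem pv_mem_update {x : String} (l : List String) (s : PySem.Set String) (h : x ∈ s) :
    x ∈ l.foldl PySem.Set.add s := by
  induction l generalizing s with
  | nil => exact h
  | cons a t ih => exact ih _ (pv_mem_add s a h)

theorem pv_mem_add_self (s : PySem.Set String) (x : String) : x ∈ PySem.Set.add s x := by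
  unfold PySem.Set.add
  split
  · rename_i hc; simpa using hc
  · simp

theorem pv_mem_update_of_mem_list {x : String} (l : List String) (s : PySem.Set String)
    (h : x ∈ l) : x ∈ l.foldl PySem.Set.add s := by
  induction l generalizing s with
  | nil => cases h
  | cons a t ih =>
    rcases List.mem_cons.mp h with rfl | hx
    · exact pv_mem_update t _ (pv_mem_add_self s x)
    · exact ih _ hx

-- update s (add t h) = add (update s t) h
theorem pv_update_add (s t : PySem.Set String) (h : String) :
    (PySem.Set.add t h).foldl PySem.Set.add s =
      PySem.Set.add (t.foldl PySem.Set.add s) h := by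
  by_cases hc : h ∈ t
  · rw [pv_add_of_mem t hc, pv_add_of_mem _ (pv_mem_update_of_mem_list t s hc)]
  · have ht : PySem.Set.add t h = t ++ [h] := by
      unfold PySem.Set.add
      rw [if_neg (by simpa using hc)]
    rw [ht, List.foldl_append]
    rfl

-- update is "associative": update s (update t l) = update (update s t) l
theorem pv_update_update (l : List String) (s t : PySem.Set String) :
    (l.foldl PySem.Set.add t).foldl PySem.Set.add s =
      l.foldl PySem.Set.add (t.foldl PySem.Set.add s) := by
  induction l generalizing s t with
  | nil => rfl
  | cons a l ih =>
    simp only [List.foldl_cons]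
    rw [ih, pv_update_add]

-- union of two ofLists is ofList of the concatenation
theorem pv_union_ofList (xs ys : List String) :
    PySem.Set.union (PySem.Set.ofList xs) (PySem.Set.ofList ys) =
      PySem.Set.ofList (xs ++ ys) := by
  unfold PySem.Set.union PySem.Set.update PySem.Set.ofList
  rw [pv_update_update, List.foldl_append]
  rfl

-- B computes set(flatMap expand) — induction following B's divide-and-conquer recursion
theorem pv_alt_eq_ofList (whitelist : List String) :
    parse_whitelist_py_alt whitelist = PySem.Set.ofList (whitelist.flatMap pvExpand) := by
  induction whitelist using parse_whitelist_py_alt.induct with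
  | case1 wl n h0 =>
    have hw : wl = [] := List.length_eq_zero_iff.mp h0
    subst hw
    rw [parse_whitelist_py_alt.eq_def]
    rfl
  | case2 wl n h0 h1 e he =>
    obtain ⟨x, hw⟩ := List.length_eq_one_iff.mp h1
    have hx : x ∈ ["localhost", "127.0.0.1", "::1"] := by
      have : e = x := by rw [show e = PySem.List.pyGetD wl 0 "" from rfl, hw]; rfl
      rwa [this] at he
    rw [hw, parse_whitelist_py_alt.eq_def]
    dsimp only
    rw [if_neg (by simp), if_pos (by simp)]
    rw [show PySem.List.pyGetD [x] 0 "" = x from rfl, if_pos hx]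
    simp [pvExpand, hx]
  | case3 wl n h0 h1 e he =>
    obtain ⟨x, hw⟩ := List.length_eq_one_iff.mp h1
    have hx : x ∉ ["localhost", "127.0.0.1", "::1"] := by
      have : e = x := by rw [show e = PySem.List.pyGetD wl 0 "" from rfl, hw]; rfl
      rwa [this] at he
    rw [hw, parse_whitelist_py_alt.eq_def]
    dsimp only
    rw [if_neg (by simp), if_pos (by simp)]
    rw [show PySem.List.pyGetD [x] 0 "" = x from rfl, if_neg hx]
    simp [pvExpand, hx]
  | case4 wl n h0 h1 mid ih1 ih2 =>
    have h0' : ¬wl.length = 0 := h0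
    have h1' : ¬wl.length = 1 := h1
    rw [parse_whitelist_py_alt.eq_def]
    dsimp only
    rw [if_neg h0', if_neg h1']
    rw [ih1, ih2, pv_union_ofList, ← List.flatMap_append, List.take_append_drop]

-- ===== VERDICT (by name: the statement is the Claim_ definition above) =====
theorem parse_whitelist_py_spec : Claim_equal_parse_whitelist_py := by
  intro whitelist _
  unfold Spec_parse_whitelist_py parse_whitelist_py
  rw [pv_alt_eq_ofList, PySem.Set.ofList_eq_foldl, pv_fold_flatMap]
  rfl
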